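-- pv_equiv track=rewrite | github.com/hoya9802/Algorithm-Notes | 프로그래머스/1/140108. 문자열 나누기/문자열 나누기.py | solution
-- ===== SOURCE A (Python) =====
-- def solution(s):
--     answer = 0
--     cnt_1, cnt_2 = 0, 0
--     for word in s:
--         if cnt_1 == cnt_2:
--             answer += 1
--             k = word
--         if k == word:
--             cnt_1 += 1
--         else:
--             cnt_2 += 1
--
--     return answer
-- ===== SOURCE B (Python) =====
-- def solution(s):
--     answer = 0
--     i, n = 0, len(s)
--     while i < n:
--         answer += 1
--         if i + 1 == n:
--             break
--         base = s[i]
--         # pair (base, s[i+1]): signed balance same-minus-other of the segment so far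
--         bal = 2 if s[i + 1] == base else 0
--         i += 2
--         # balance can reach zero only at even segment lengths, so it suffices to
--         # examine the string two characters at a time
--         while bal != 0 and i + 1 < n:
--             bal += (1 if s[i] == base else -1) + (1 if s[i + 1] == base else -1)
--             i += 2
--         if bal != 0:
--             i = n  # trailing remainder (odd length) can never rebalance this segment
--     return answer
-- ===== Notes on version B (the rewrite author's own statement) =====
-- stated objective: alternative
-- what changed: Replaced A's per-character scan with two running counters and a start-of-segment test by a stride-2 scan: B keeps a single signed balance per segment and examines the string two characters at a time, relying on the parity fact that a segment can only close at even length; an odd trailing remainder is absorbed without scanning it.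
import Mathlib
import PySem

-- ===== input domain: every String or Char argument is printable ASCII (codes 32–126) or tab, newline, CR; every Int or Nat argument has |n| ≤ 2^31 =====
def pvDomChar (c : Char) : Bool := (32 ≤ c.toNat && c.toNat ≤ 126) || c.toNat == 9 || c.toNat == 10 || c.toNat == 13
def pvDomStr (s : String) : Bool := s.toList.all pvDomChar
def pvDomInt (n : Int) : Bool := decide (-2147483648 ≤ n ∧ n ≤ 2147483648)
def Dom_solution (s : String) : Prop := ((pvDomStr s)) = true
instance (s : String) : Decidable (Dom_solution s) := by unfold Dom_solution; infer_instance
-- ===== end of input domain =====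

-- B replaces A's per-character two-counter scan by a stride-2 scan with ONE signed balance,
-- exploiting that a segment can only close at even length (alternative decomposition; same cost).

-- ===== PORT A =====
-- state: (answer, cnt_1, cnt_2, k); k's initial value is never read (first iteration sets it)
def solutionStep (st : Int × Int × Int × Char) (word : Char) : Int × Int × Int × Char :=
  let (answer, cnt1, cnt2, k) := st
  let (answer, k) := if cnt1 == cnt2 then (answer + 1, word) else (answer, k)
  if k == word then (answer, cnt1 + 1, cnt2, k) else (answer, cnt1, cnt2 + 1, k)

def solution (s : String) : Int :=
  (s.toList.foldl solutionStep (0, 0, 0, 'a')).1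

-- ===== PORT B =====
-- inner while loop of Source B: consume chars two at a time while bal ≠ 0; returns the rest of
-- the string when bal hits 0, and [] when the segment absorbs everything (bal never 0)
def solutionAltInner (base : Char) (bal : Int) : List Char → List Char
  | a :: b :: rest =>
    if bal == 0 then a :: b :: rest
    else solutionAltInner base
      (bal + (if a == base then 1 else -1) + (if b == base then 1 else -1)) rest
  | l => if bal == 0 then l else []

theorem solutionAltInner_length_le_aux (base : Char) :
    ∀ (n : Nat) (l : List Char), l.length ≤ n → ∀ (bal : Int),
      (solutionAltInner base bal l).length ≤ l.length := by
  intro n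
  induction n with
  | zero =>
    intro l hl bal
    have : l = [] := List.length_eq_zero_iff.mp (Nat.le_zero.mp hl)
    subst this; simp [solutionAltInner]
  | succ n ih =>
    intro l hl bal
    match l with
    | [] => simp [solutionAltInner]
    | [a] => simp [solutionAltInner]; split <;> simp
    | a :: b :: rest =>
      simp only [solutionAltInner]
      split
      · simp
      · have hr : rest.length ≤ n := by simp at hl; omega
        calc (solutionAltInner base _ rest).length ≤ rest.length := ih rest hr _
          _ ≤ (a :: b :: rest).length := by simp; omega

theorem solutionAltInner_length_le (base : Char) (l : List Char) (bal : Int) :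
    (solutionAltInner base bal l).length ≤ l.length :=
  solutionAltInner_length_le_aux base l.length l le_rfl bal

-- outer while loop of Source B: one segment per iteration
def solutionAltOuter : List Char → Int
  | [] => 0
  | [_] => 1
  | c :: d :: rest =>
    1 + solutionAltOuter (solutionAltInner c (if d == c then 2 else 0) rest)
termination_by l => l.length
decreasing_by
  exact Nat.lt_of_le_of_lt (solutionAltInner_length_le _ _ _) (by simp)

def solution_alt (s : String) : Int := solutionAltOuter s.toList

-- ===== PRECONDITION & SPEC =====
def Spec_solution (s : String) (out : Int) : Prop := out = solution_alt s
instance (s : String) (out : Int) : Decidable (Spec_solution s out) := by unfold Spec_solution; infer_instance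

-- ===== CLAIM (what is proved, stated in full; the proofs are below) =====
def Claim_equal_solution : Prop := ∀ (s : String), Dom_solution s → Spec_solution s (solution s)

-- ===== LEMMAS AND PROOFS =====

theorem solutionAltInner_zero (base : Char) (l : List Char) :
    solutionAltInner base 0 l = l := by
  match l with
  | [] => simp [solutionAltInner]
  | [a] => simp [solutionAltInner]
  | a :: b :: rest => simp [solutionAltInner]

-- combined invariant, by strong induction on the list length:
-- (i) from a balanced state A's fold adds exactly solutionAltOuter l to the answer;
-- (ii) mid-segment, with counters offset by (so, oo), so ≠ oo, so - oo even, A's fold adds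
--     solutionAltOuter of the list remaining after B's inner pair loop.
theorem solution_invariant : ∀ (n : Nat) (l : List Char), l.length ≤ n →
    ((∀ (ans c : Int) (k : Char),
        (List.foldl solutionStep (ans, c, c, k) l).1 = ans + solutionAltOuter l) ∧
     (∀ (so oo : Int), so ≠ oo → (so - oo) % 2 = 0 → ∀ (ans c : Int) (base : Char),
        (List.foldl solutionStep (ans, c + so, c + oo, base) l).1
          = ans + solutionAltOuter (solutionAltInner base (so - oo) l))) := by
  intro n
  induction n with
  | zero =>
    intro l hl
    have : l = [] := List.length_eq_zero_iff.mp (Nat.le_zero.mp hl)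
    subst this
    refine ⟨fun ans c k => by simp [solutionAltOuter], fun so oo hne _ ans c base => ?_⟩
    have h0 : ((so - oo : Int) == 0) = false := by simp [beq_eq_false_iff_ne]; omega
    simp [solutionAltInner, h0, solutionAltOuter]
  | succ n ih =>
    intro l hl
    match l with
    | [] =>
      refine ⟨fun ans c k => by simp [solutionAltOuter], fun so oo hne _ ans c base => ?_⟩
      have h0 : ((so - oo : Int) == 0) = false := by simp [beq_eq_false_iff_ne]; omega
      simp [solutionAltInner, h0, solutionAltOuter]
    | [a] =>
      constructor
      · intro ans c k
        have hstep : solutionStep (ans, c, c, k) a = (ans + 1, c + 1, c, a) := by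
          simp [solutionStep]
        simp [hstep, solutionAltOuter]
      · intro so oo hne _ ans c base
        have hcc : ((c + so : Int) == c + oo) = false := by
          simp [beq_eq_false_iff_ne]; omega
        have h0 : ((so - oo : Int) == 0) = false := by simp [beq_eq_false_iff_ne]; omega
        simp only [List.foldl_cons, List.foldl_nil, solutionStep, hcc, if_false,
          Bool.false_eq_true]
        simp [solutionAltInner, h0, solutionAltOuter]
        split <;> rfl
    | a :: b :: rest =>
      have hr : rest.length ≤ n := by simp at hl; omega
      constructor
      · -- balanced start: first char opens a segment (base := a, bal 1), second char pairs it
        intro ans c k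
        have hstep1 : solutionStep (ans, c, c, k) a = (ans + 1, c + 1, c, a) := by
          simp [solutionStep]
        by_cases hba : b = a
        · have hstep2 : solutionStep (ans + 1, c + 1, c, a) b = (ans + 1, c + 1 + 1, c, a) := by
            simp [solutionStep, hba]
          rw [List.foldl_cons, hstep1, List.foldl_cons, hstep2]
          have h := (ih rest hr).2 2 0 (by norm_num) (by norm_num) (ans + 1) c a
          simp only [add_zero] at h
          have e1 : c + 1 + 1 = c + 2 := by ring
          rw [e1, h]
          have hb2 : (b == a) = true := by simp [hba]
          simp [solutionAltOuter, hb2, add_assoc]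
        · have hab' : (a == b) = false := by simp [beq_eq_false_iff_ne]; exact fun h => hba h.symm
          have hne1 : ((c + 1 : Int) == c) = false := by simp
          have hstep2 : solutionStep (ans + 1, c + 1, c, a) b = (ans + 1, c + 1, c + 1, a) := by
            simp [solutionStep, hne1, hab']
          rw [List.foldl_cons, hstep1, List.foldl_cons, hstep2]
          have h := (ih rest hr).1 (ans + 1) (c + 1) a
          rw [h]
          have hb2 : (b == a) = false := by simp [beq_eq_false_iff_ne, hba]
          simp [solutionAltOuter, hb2, solutionAltInner_zero, add_assoc]
      · -- mid-segment: balance even and nonzero, so neither of the two steps closes it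
        intro so oo hne heven ans c base
        have hcc : ((c + so : Int) == c + oo) = false := by
          simp [beq_eq_false_iff_ne]; omega
        have h0 : ((so - oo : Int) == 0) = false := by simp [beq_eq_false_iff_ne]; omega
        by_cases hab : a = base
        · have hstep1 : solutionStep (ans, c + so, c + oo, base) a
              = (ans, c + so + 1, c + oo, base) := by
            simp [solutionStep, hcc, hab]
          have hcc1 : ((c + so + 1 : Int) == c + oo) = false := by
            simp [beq_eq_false_iff_ne]
            intro h
            have : so - oo = -1 := by omega
            omega
          by_cases hbb : b = base
          · have hstep2 : solutionStep (ans, c + so + 1, c + oo, base) b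
                = (ans, c + so + 1 + 1, c + oo, base) := by
              simp [solutionStep, hcc1, hbb]
            rw [List.foldl_cons, hstep1, List.foldl_cons, hstep2]
            have hA : (a == base) = true := by simp [hab]
            have hB : (b == base) = true := by simp [hbb]
            simp only [solutionAltInner, h0, Bool.false_eq_true, if_false, hA, hB, if_true]
            by_cases hz : so + 2 = oo
            · -- cannot happen towards 0? indeed bal + 2 = so - oo + 2 = 0 allowed when so-oo = -2
              have e1 : c + so + 1 + 1 = c + oo := by omega
              rw [e1]
              have h := (ih rest hr).1 ans (c + oo) base
              rw [h]
              have e2 : so - oo + 1 + 1 = 0 := by omega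
              rw [e2, solutionAltInner_zero]
            · have h := (ih rest hr).2 (so + 2) oo (by omega) (by omega) ans c base
              have e1 : c + so + 1 + 1 = c + (so + 2) := by ring
              rw [e1, h]
              have e2 : so - oo + 1 + 1 = so + 2 - oo := by ring
              rw [e2]
          · have hbB : (base == b) = false := by
              simp [beq_eq_false_iff_ne]; exact fun h => hbb h.symm
            have hstep2 : solutionStep (ans, c + so + 1, c + oo, base) b
                = (ans, c + so + 1, c + oo + 1, base) := by
              simp [solutionStep, hcc1, hbB]
            rw [List.foldl_cons, hstep1, List.foldl_cons, hstep2]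
            have hA : (a == base) = true := by simp [hab]
            have hB : (b == base) = false := by simp [beq_eq_false_iff_ne, hbb]
            simp only [solutionAltInner, h0, Bool.false_eq_true, if_false, hA, hB, if_true]
            have h := (ih rest hr).2 (so + 1) (oo + 1) (by omega) (by omega) ans c base
            have e1 : c + so + 1 = c + (so + 1) := by ring
            have e2 : c + oo + 1 = c + (oo + 1) := by ring
            rw [e1, e2, h]
            have e3 : so - oo + 1 + -1 = so + 1 - (oo + 1) := by ring
            rw [e3]
        · have haB : (base == a) = false := by
            simp [beq_eq_false_iff_ne]; exact fun h => hab h.symm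
          have hstep1 : solutionStep (ans, c + so, c + oo, base) a
              = (ans, c + so, c + oo + 1, base) := by
            simp [solutionStep, hcc, haB]
          have hcc1 : ((c + so : Int) == c + oo + 1) = false := by
            simp [beq_eq_false_iff_ne]
            intro h
            have : so - oo = 1 := by omega
            omega
          by_cases hbb : b = base
          · have hstep2 : solutionStep (ans, c + so, c + oo + 1, base) b
                = (ans, c + so + 1, c + oo + 1, base) := by
              simp [solutionStep, hcc1, hbb]
            rw [List.foldl_cons, hstep1, List.foldl_cons, hstep2]
            have hA : (a == base) = false := by simp [beq_eq_false_iff_ne, hab]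
            have hB : (b == base) = true := by simp [hbb]
            simp only [solutionAltInner, h0, Bool.false_eq_true, if_false, hA, hB, if_true]
            have h := (ih rest hr).2 (so + 1) (oo + 1) (by omega) (by omega) ans c base
            have e1 : c + so + 1 = c + (so + 1) := by ring
            have e2 : c + oo + 1 = c + (oo + 1) := by ring
            rw [e1, e2, h]
            have e3 : so - oo + -1 + 1 = so + 1 - (oo + 1) := by ring
            rw [e3]
          · have hbB : (base == b) = false := by
              simp [beq_eq_false_iff_ne]; exact fun h => hbb h.symm
            have hstep2 : solutionStep (ans, c + so, c + oo + 1, base) b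
                = (ans, c + so, c + oo + 1 + 1, base) := by
              simp [solutionStep, hcc1, hbB]
            rw [List.foldl_cons, hstep1, List.foldl_cons, hstep2]
            have hA : (a == base) = false := by simp [beq_eq_false_iff_ne, hab]
            have hB : (b == base) = false := by simp [beq_eq_false_iff_ne, hbb]
            simp only [solutionAltInner, h0, Bool.false_eq_true, if_false, hA, hB]
            by_cases hz : so = oo + 2
            · have e1 : c + oo + 1 + 1 = c + so := by omega
              rw [e1]
              have h := (ih rest hr).1 ans (c + so) base
              rw [h]
              have e2 : so - oo + -1 + -1 = 0 := by omega
              rw [e2, solutionAltInner_zero]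
            · have h := (ih rest hr).2 so (oo + 2) (by omega) (by omega) ans c base
              have e1 : c + oo + 1 + 1 = c + (oo + 2) := by ring
              rw [e1, h]
              have e2 : so - oo + -1 + -1 = so - (oo + 2) := by ring
              rw [e2]

-- ===== VERDICT (by name: the statement is the Claim_ definition above) =====
theorem solution_spec : Claim_equal_solution := by
  intro s _
  unfold Spec_solution solution solution_alt
  have h := (solution_invariant s.toList.length s.toList le_rfl).1 0 0 'a'
  rw [h]; ring
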